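-- pv_equiv track=rewrite | github.com/nakyungLee20/prm_shaping | inference/answer_matcher.py | _fix_sqrt
-- ===== SOURCE A (Python) =====
-- def _fix_sqrt(s: str) -> str:
--     if "\\sqrt" not in s:
--         return s
--     parts = s.split("\\sqrt")
--     new = parts[0]
--     for tail in parts[1:]:
--         if tail and tail[0] != "{":
--             new += f"\\sqrt{{{tail[0]}}}{tail[1:]}"
--         else:
--             new += "\\sqrt" + tail
--     return new
-- ===== SOURCE B (Python) =====
-- def _fix_sqrt(s: str) -> str:
--     # Single left-to-right scan with an "just saw \sqrt" flag; no split/rejoin.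
--     out = []
--     after = False
--     i, n = 0, len(s)
--     while i < n:
--         if s.startswith("\\sqrt", i):
--             out.append("\\sqrt")
--             i += 5
--             after = True
--         else:
--             c = s[i]
--             out.append("{" + c + "}" if after and c != "{" else c)
--             i += 1
--             after = False
--     return "".join(out)
-- ===== Notes on version B (the rewrite author's own statement) =====
-- stated objective: alternative
-- what changed: Replaced split-on-'\sqrt' plus a rebuild loop over the parts by a single left-to-right state-machine scan (flag 'just saw \sqrt') that wraps the next char in braces in one pass, with no split/join.
import Mathlib
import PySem

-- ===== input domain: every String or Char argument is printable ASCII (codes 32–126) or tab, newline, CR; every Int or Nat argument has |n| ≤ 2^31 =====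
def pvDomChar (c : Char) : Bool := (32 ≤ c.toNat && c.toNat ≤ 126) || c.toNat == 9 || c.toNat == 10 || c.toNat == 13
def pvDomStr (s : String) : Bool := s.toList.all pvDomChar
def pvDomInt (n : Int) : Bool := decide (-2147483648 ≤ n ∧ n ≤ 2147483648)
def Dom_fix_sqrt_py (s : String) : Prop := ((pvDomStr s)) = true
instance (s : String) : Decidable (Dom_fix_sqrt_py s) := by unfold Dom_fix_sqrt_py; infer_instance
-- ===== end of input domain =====

-- B replaces A's split-on-"\sqrt" + rebuild loop by a one-pass state-machine scan (objective: alternative).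

-- ===== PORT A =====
-- literal port of A: guard, split on "\sqrt", rebuild by folding over the tail parts
def fixSqrtTailStep (new : List Char) (tail : List Char) : List Char :=
  match tail with
  | c :: t =>
    if c ≠ '{' then new ++ "\\sqrt".toList ++ ['{', c, '}'] ++ t
    else new ++ "\\sqrt".toList ++ tail
  | [] => new ++ "\\sqrt".toList

def fix_sqrt_py (s : String) : String :=
  if PySem.Str.isIn "\\sqrt" s = false then s
  else
    match PySem.Chars.splitOn s.toList "\\sqrt".toList with
    | [] => ""  -- unreachable: split always returns a nonempty list
    | p0 :: rest => String.ofList (rest.foldl fixSqrtTailStep p0)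

-- ===== PORT B =====
-- literal port of B: single scan; `after` = "the previous token emitted was \sqrt"
def fixSqrtScan (after : Bool) (l : List Char) : List Char :=
  match l with
  | [] => []
  | c :: rest =>
    if "\\sqrt".toList.isPrefixOf (c :: rest) then
      "\\sqrt".toList ++ fixSqrtScan true ((c :: rest).drop 5)
    else
      (if after && c ≠ '{' then ['{', c, '}'] else [c]) ++ fixSqrtScan false rest
termination_by l.length
decreasing_by
  · simp
  · simp

def fix_sqrt_py_alt (s : String) : String := String.ofList (fixSqrtScan false s.toList)

-- ===== PRECONDITION & SPEC =====
def Spec_fix_sqrt_py (s : String) (out : String) : Prop := out = fix_sqrt_py_alt s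
instance (s : String) (out : String) : Decidable (Spec_fix_sqrt_py s out) := by unfold Spec_fix_sqrt_py; infer_instance

-- ===== CLAIM (what is proved, stated in full; the proofs are below) =====
def Claim_equal_fix_sqrt_py : Prop := ∀ (s : String), Dom_fix_sqrt_py s → Spec_fix_sqrt_py s (fix_sqrt_py s)

-- ===== LEMMAS AND PROOFS =====

-- clean structural description of PySem.Chars.splitOn s "\sqrt"
def mySplit (l : List Char) : List (List Char) :=
  match l with
  | [] => [[]]
  | c :: rest =>
    if "\\sqrt".toList.isPrefixOf (c :: rest) then
      [] :: mySplit ((c :: rest).drop 5)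
    else
      (mySplit rest).modifyHead (fun p => c :: p)
termination_by l.length
decreasing_by
  · simp
  · simp

lemma mySplit_ne_nil (l : List Char) : mySplit l ≠ [] := by
  induction l with
  | nil => simp [mySplit]
  | cons c rest ih =>
    rw [mySplit]
    split
    · simp
    · cases h : mySplit rest with
      | nil => exact absurd h ih
      | cons a as => simp

lemma splitOn_go_spec :
    ∀ (fuel : Nat) (l cur : List Char) (acc : List (List Char)),
      l.length + 1 ≤ fuel →
      PySem.Chars.splitOn.go "\\sqrt".toList fuel l cur acc =
        acc.reverse ++ (mySplit l).modifyHead (fun p => cur.reverse ++ p) := by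
  intro fuel
  induction fuel with
  | zero => intro l cur acc h; omega
  | succ n ih =>
    intro l cur acc h
    match l with
    | [] =>
      simp [PySem.Chars.splitOn.go, mySplit]
    | c :: rest =>
      rw [PySem.Chars.splitOn.go]
      by_cases hp : "\\sqrt".toList.isPrefixOf (c :: rest)
      · have h5 : 5 ≤ (c :: rest).length := by
          have := List.IsPrefix.length_le (List.isPrefixOf_iff_prefix.mp hp)
          simpa using this
        rw [if_pos hp, ih _ _ _ (by simp at *; omega)]
        rw [mySplit, if_pos hp]
        simp
        cases mySplit (List.drop 4 rest) <;> simp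
      · rw [if_neg hp, ih _ _ _ (by simp at h ⊢; omega)]
        rw [mySplit, if_neg hp]
        cases hms : mySplit rest with
        | nil => exact absurd hms (mySplit_ne_nil rest)
        | cons a as => simp

lemma splitOn_eq_mySplit (l : List Char) :
    PySem.Chars.splitOn l "\\sqrt".toList = mySplit l := by
  rw [PySem.Chars.splitOn, splitOn_go_spec _ _ _ _ (le_refl _)]
  cases h : mySplit l with
  | nil => exact absurd h (mySplit_ne_nil l)
  | cons a as => simp

-- what A prepends to each non-'{' tail part: "\sqrt" then the part with its head wrapped
def wrapHead (p : List Char) : List Char :=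
  match p with
  | c :: t => if c ≠ '{' then '{' :: c :: '}' :: t else p
  | [] => []

def procTail (tail : List Char) : List Char := "\\sqrt".toList ++ wrapHead tail

lemma fixSqrtTailStep_eq (new tail : List Char) :
    fixSqrtTailStep new tail = new ++ procTail tail := by
  match tail with
  | [] => simp [fixSqrtTailStep, procTail, wrapHead]
  | c :: t =>
    by_cases hc : c = '{' <;> simp [fixSqrtTailStep, procTail, wrapHead, hc]

lemma foldl_tailStep (rest : List (List Char)) (p0 : List Char) :
    rest.foldl fixSqrtTailStep p0 = p0 ++ rest.flatMap procTail := by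
  induction rest generalizing p0 with
  | nil => simp
  | cons a as ih => simp [ih, fixSqrtTailStep_eq]

-- A's output on parts: head unchanged / head wrapped, each later part rendered by procTail
def renderF (parts : List (List Char)) : List Char :=
  parts.headI ++ parts.tail.flatMap procTail

def renderG (parts : List (List Char)) : List Char :=
  wrapHead parts.headI ++ parts.tail.flatMap procTail

lemma scan_eq_render (l : List Char) :
    fixSqrtScan false l = renderF (mySplit l) ∧
    fixSqrtScan true l = renderG (mySplit l) := by
  match l with
  | [] => simp [fixSqrtScan, mySplit, renderF, renderG, wrapHead]
  | c :: rest =>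
    by_cases hp : "\\sqrt".toList.isPrefixOf (c :: rest)
    · have h5 : 5 ≤ (c :: rest).length := by
        have := List.IsPrefix.length_le (List.isPrefixOf_iff_prefix.mp hp)
        simpa using this
      have ih := scan_eq_render ((c :: rest).drop 5)
      rw [fixSqrtScan, fixSqrtScan, if_pos hp, if_pos hp, mySplit, if_pos hp]
      cases hms : mySplit ((c :: rest).drop 5) with
      | nil => exact absurd hms (mySplit_ne_nil _)
      | cons a as =>
        simp only [List.drop_succ_cons] at ih hms
        rw [hms] at ih
        constructor <;>
          simp [ih.2, renderF, renderG, procTail, wrapHead]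
    · have ih := scan_eq_render rest
      rw [fixSqrtScan, fixSqrtScan, if_neg hp, if_neg hp, mySplit, if_neg hp]
      cases hms : mySplit rest with
      | nil => exact absurd hms (mySplit_ne_nil _)
      | cons a as =>
        rw [hms] at ih
        refine ⟨?_, ?_⟩
        · simp [ih.1, renderF]
        · by_cases hc : c = '{' <;>
            simp [ih.1, renderF, renderG, wrapHead, hc]
termination_by l.length
decreasing_by
  · simp
  · simp

lemma mySplit_of_not_infix (l : List Char) (h : ¬ "\\sqrt".toList <:+: l) :
    mySplit l = [l] := by
  induction l with
  | nil => simp [mySplit]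
  | cons c rest ih =>
    have hp : ¬ "\\sqrt".toList.isPrefixOf (c :: rest) := by
      intro hc
      exact h ((List.isPrefixOf_iff_prefix.mp hc).isInfix)
    rw [mySplit, if_neg hp, ih (fun hi => h (hi.trans (List.suffix_cons c rest).isInfix))]
    simp

-- ===== VERDICT (by name: the statement is the Claim_ definition above) =====
theorem fix_sqrt_py_spec : Claim_equal_fix_sqrt_py := by
  intro s _
  unfold Spec_fix_sqrt_py fix_sqrt_py fix_sqrt_py_alt
  rw [(scan_eq_render s.toList).1]
  by_cases hin : PySem.Str.isIn "\\sqrt" s = false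
  · rw [if_pos hin]
    have hni : ¬ "\\sqrt".toList <:+: s.toList := by
      have h2 : PySem.Chars.isIn "\\sqrt".toList s.toList = false := by simpa using hin
      exact (PySem.Chars.isIn_eq_false_iff _ _).mp h2
    rw [mySplit_of_not_infix _ hni]
    simp [renderF]
  · rw [if_neg hin, splitOn_eq_mySplit]
    cases hms : mySplit s.toList with
    | nil => exact absurd hms (mySplit_ne_nil _)
    | cons a as =>
      show String.ofList (as.foldl fixSqrtTailStep a) = _
      rw [foldl_tailStep]
      simp [renderF]
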